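-- pv_equiv track=rewrite | github.com/Neelharia97/Python-Financial-Engineering-FE520B | HW2/Assignment2.py | identi_Substring
-- ===== SOURCE A (Python) =====
-- def identi_Substring(test_string):
--     length_string = len(test_string)
--     if length_string == 0:
--         return 0
--
--     substr_count = 0
--
--     x = 0
--     y = x+1
--     while y < length_string:
--         if test_string[x] == test_string[y]:
--             y+=1
--         else:
--             difference = y-x
--             substr_count += (difference*(difference + 1))/2
--             x, y = y, y+1
--     remaining= length_string - x
--     substr_count += (remaining * (remaining +1))/2
--     return int(substr_count)
-- ===== SOURCE B (Python) =====
-- def identi_Substring(test_string):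
--     total = 0
--     run = 0
--     prev = None
--     for ch in test_string:
--         run = run + 1 if ch == prev else 1
--         total += run
--         prev = ch
--     return total
-- ===== Notes on version B (the rewrite author's own statement) =====
-- stated objective: simpler
-- what changed: Replaces the two-index while loop with per-run closed-form triangle sums by a single for-loop keeping an incremental run-length counter and adding it each character.
import Mathlib
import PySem

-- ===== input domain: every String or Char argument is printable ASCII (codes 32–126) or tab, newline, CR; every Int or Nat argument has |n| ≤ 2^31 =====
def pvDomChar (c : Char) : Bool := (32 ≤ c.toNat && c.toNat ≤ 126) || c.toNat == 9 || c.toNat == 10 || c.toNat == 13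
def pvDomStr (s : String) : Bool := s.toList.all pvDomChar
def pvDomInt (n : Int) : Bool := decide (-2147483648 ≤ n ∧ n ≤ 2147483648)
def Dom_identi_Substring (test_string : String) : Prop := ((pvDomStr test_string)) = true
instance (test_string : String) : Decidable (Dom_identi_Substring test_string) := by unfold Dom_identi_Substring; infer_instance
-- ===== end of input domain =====

-- B replaces A's two-index while loop with closed-form triangle sums per run by a single
-- pass keeping an incremental run-length counter added each character (objective: simpler).


-- ===== PORT A =====
-- difference*(difference+1)/2: Python float division, but the numerator is always even and
-- the accumulated values integral, so Nat arithmetic is exact here.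
def pvTri (d : Nat) : Nat := d * (d + 1) / 2

-- the while loop of A: state (x, y, substr_count); returns (substr_count, x) at exit
def pvLoopA (cs : List Char) (x y cnt : Nat) : Nat × Nat :=
  if y < cs.length then
    if cs[x]? == cs[y]? then
      pvLoopA cs x (y + 1) cnt
    else
      pvLoopA cs y (y + 1) (cnt + pvTri (y - x))
  else (cnt, x)
termination_by cs.length - y

def identi_Substring (test_string : String) : Int :=
  let cs := test_string.toList
  let length_string := cs.length
  if length_string = 0 then 0
  else
    let r := pvLoopA cs 0 1 0
    let remaining := length_string - r.2
    ((r.1 + pvTri remaining : Nat) : Int)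

-- ===== PORT B =====
def identi_Substring_alt (test_string : String) : Int :=
  (test_string.toList.foldl
    (fun (st : Int × Int × Option Char) ch =>
      let run := if some ch == st.2.2 then st.2.1 + 1 else 1
      (st.1 + run, run, some ch))
    (0, 0, none)).1

-- ===== PRECONDITION & SPEC =====
def Spec_identi_Substring (test_string : String) (out : Int) : Prop := out = identi_Substring_alt test_string
instance (test_string : String) (out : Int) : Decidable (Spec_identi_Substring test_string out) := by unfold Spec_identi_Substring; infer_instance

-- ===== CLAIM (what is proved, stated in full; the proofs are below) =====
def Claim_equal_identi_Substring : Prop := ∀ (test_string : String), Dom_identi_Substring test_string → Spec_identi_Substring test_string (identi_Substring test_string)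

-- ===== LEMMAS AND PROOFS =====

-- reference function: total added by B's loop when continuing after prev with current run r
def pvG (l : List Char) (p : Char) (r : Nat) : Nat :=
  match l with
  | [] => 0
  | c :: l => if c = p then (r + 1) + pvG l c (r + 1) else 1 + pvG l c 1

theorem pvTri_succ (r : Nat) : pvTri (r + 1) = pvTri r + (r + 1) := by
  unfold pvTri
  have h : (r + 1) * (r + 1 + 1) = r * (r + 1) + (r + 1) * 2 := by ring
  rw [h, Nat.add_mul_div_right _ _ (by norm_num : 0 < 2)]

theorem pvFold_eq (l : List Char) : ∀ (p : Char) (t : Int) (r : Nat),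
    (l.foldl (fun (st : Int × Int × Option Char) ch =>
        let run := if some ch == st.2.2 then st.2.1 + 1 else 1
        (st.1 + run, run, some ch)) (t, (r : Int), some p)).1
      = t + (pvG l p r : Nat) := by
  induction l with
  | nil => intro p t r; simp [pvG]
  | cons c l ih =>
    intro p t r
    by_cases hc : c = p
    · have : (some c == some p) = true := by simp [hc]
      simp only [List.foldl_cons, this]
      have := ih c (t + ((r : Int) + 1)) (r + 1)
      push_cast at this ⊢
      simpa [hc, pvG, add_assoc, add_comm, add_left_comm] using this
    · have hbe : (some c == some p) = false := by simp [hc]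
      simp only [List.foldl_cons, hbe]
      have := ih c (t + 1) 1
      push_cast at this ⊢
      simpa [hc, pvG, add_assoc, add_comm, add_left_comm] using this

theorem pvLoopA_eq (cs : List Char) : ∀ (n y x cnt : Nat) (p : Char),
    cs.length - y = n → x < y → y ≤ cs.length → cs[x]? = some p →
    (pvLoopA cs x y cnt).1 + pvTri (cs.length - (pvLoopA cs x y cnt).2)
      = cnt + pvTri (y - x) + pvG (cs.drop y) p (y - x) := by
  intro n
  induction n with
  | zero =>
    intro y x cnt p hn hxy hylen hx
    have hy : y = cs.length := by omega
    rw [pvLoopA]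
    simp [hy, pvG, List.drop_length]
  | succ n ih =>
    intro y x cnt p hn hxy hylen hx
    have hylt : y < cs.length := by omega
    have hyget : cs[y]? = some cs[y] := List.getElem?_eq_getElem hylt
    have hdrop : cs.drop y = cs[y] :: cs.drop (y + 1) :=
      (List.getElem_cons_drop hylt).symm
    rw [pvLoopA, if_pos hylt, hx, hyget]
    by_cases hc : p = cs[y]
    · have hbe : (some p == some cs[y]) = true := by simp [hc]
      rw [if_pos hbe]
      have := ih (y + 1) x cnt p (by omega) (by omega) (by omega) hx
      rw [this, hdrop]
      have hsub : (y + 1) - x = (y - x) + 1 := by omega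
      simp [pvG, hc.symm, hsub, pvTri_succ, add_assoc, add_left_comm]
    · have hbe : (some p == some cs[y]) = false := by simp [hc]
      rw [if_neg (by simp [hbe])]
      have := ih (y + 1) y (cnt + pvTri (y - x)) cs[y] (by omega) (by omega) (by omega) hyget
      rw [this, hdrop]
      have h1 : (y + 1) - y = 1 := by omega
      have hne : ¬ cs[y] = p := fun h => hc h.symm
      simp [pvG, hne, h1, pvTri, add_assoc, add_comm, add_left_comm]

-- ===== VERDICT (by name: the statement is the Claim_ definition above) =====
theorem identi_Substring_spec : Claim_equal_identi_Substring := by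
  intro s _
  unfold Spec_identi_Substring identi_Substring identi_Substring_alt
  cases hcs : s.toList with
  | nil => simp
  | cons c l =>
    have hlen : (c :: l).length ≠ 0 := by simp
    simp only [if_neg hlen]
    have hA := pvLoopA_eq (c :: l) ((c :: l).length - 1) 1 0 0 c rfl
      (by omega) (by simp) (by simp)
    have hB : ((c :: l).foldl
        (fun (st : Int × Int × Option Char) ch =>
          let run := if some ch == st.2.2 then st.2.1 + 1 else 1
          (st.1 + run, run, some ch)) (0, 0, none)).1
        = 1 + (pvG l c 1 : Nat) := by
      have hstep : (some c == (none : Option Char)) = false := rfl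
      simp only [List.foldl_cons, hstep]
      have := pvFold_eq l c 1 1
      push_cast at this ⊢
      simpa using this
    rw [hB]
    have hgoal : ((pvLoopA (c :: l) 0 1 0).1 + pvTri ((c :: l).length - (pvLoopA (c :: l) 0 1 0).2) : Nat)
        = 1 + pvG l c 1 := by
      rw [hA]; simp [pvTri]
    rw [hgoal]; push_cast; ring
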